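-- pv_equiv track=rewrite | github.com/bubeck/bzf-2-quiz | convert.py | split_answers
-- ===== SOURCE A (Python) =====
-- def split_answers(questions):
--     """
--     Splits the answer options for each question and formats them.
--
--     Parameters:
--     - questions (list): A list of strings, each containing a question and its answer options.
--
--     Returns:
--     - list: A list of strings with formatted answer options for each question.
--     """
--     for i in range(len(questions)):
--         q1 = questions[i].split("\n")
--         q2 = [q1[0]]
--         answer_no = "B"
--         answer_start = 1
--         for j in range(1,len(q1)):
--             if q1[j].startswith(f'{answer_no} ') or q1[j] == answer_no:
--                 q1[answer_start] = q1[answer_start][2:]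
--                 q2.append(" ".join(q1[answer_start:j]).strip())
--                 answer_start = j
--                 answer_no = chr(ord(answer_no)+1)
--         q1[answer_start] = q1[answer_start][2:]
--         q2.append(" ".join(q1[answer_start:]).strip())
--
--         questions[i] = "\n".join(q2)
--
--     return questions
-- ===== SOURCE B (Python) =====
-- def split_answers(questions):
--     """Same reformatting as the original, but with an explicit accumulator of the
--     in-progress answer's lines instead of an index pointer and in-place slicing.
--     Mutates `questions` in place (like the original) and returns it."""
--     for i, q in enumerate(questions):
--         lines = q.split("\n")
--         out = [lines[0]]
--         expected = "B"
--         current = [lines[1]]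
--         for line in lines[2:]:
--             if line == expected or line.startswith(expected + " "):
--                 out.append(_flush(current))
--                 current = [line]
--                 expected = chr(ord(expected) + 1)
--             else:
--                 current.append(line)
--         out.append(_flush(current))
--         questions[i] = "\n".join(out)
--     return questions
--
-- def _flush(current):
--     return " ".join([current[0][2:]] + current[1:]).strip()
-- ===== Notes on version B (the rewrite author's own statement) =====
-- stated objective: simpler
-- what changed: Replaces A's index-pointer (answer_start) plus in-place slicing of q1 and repeated q1[answer_start:j] slices with an explicit accumulator holding the current answer's lines, flushed at each marker — no list mutation or index arithmetic remains.
-- intended difference: On questions whose second line is itself the 'B'-marker, A emits a spurious empty first answer and strips the marker line twice (its in-place slice at the first flush is sliced again by a later flush), while B reads the line after the heading as the first answer and strips its two marker characters once, the intended formatting. — e.g. on split_answers(["Q\nB y"]): A returns ["Q\n\n"], B returns ["Q\ny"]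
import Mathlib
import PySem

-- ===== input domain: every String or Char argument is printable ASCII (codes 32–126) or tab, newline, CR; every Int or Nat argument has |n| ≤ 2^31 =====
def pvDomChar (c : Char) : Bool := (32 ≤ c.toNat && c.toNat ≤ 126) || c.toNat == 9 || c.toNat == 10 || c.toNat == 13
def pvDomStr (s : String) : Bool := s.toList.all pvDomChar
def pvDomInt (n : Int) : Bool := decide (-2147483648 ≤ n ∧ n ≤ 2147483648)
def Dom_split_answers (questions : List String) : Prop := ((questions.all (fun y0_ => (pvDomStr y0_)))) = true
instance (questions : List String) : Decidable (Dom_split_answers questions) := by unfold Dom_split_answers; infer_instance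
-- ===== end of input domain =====

-- B replaces A's index-pointer + in-place-slice mechanism with an explicit accumulator of the
-- current answer's lines (objective: simpler). Both A and B mutate `questions` in place in Python
-- and raise IndexError on a newline-less question; the equivalence proved here is about the
-- returned list. On questions whose second line is itself a "B"-marker, A's answers differ
-- (mutation leftovers) — see D_ below.


-- ===== PORT A =====
-- shared helpers (both Pythons use the same little operations):
-- q.split("\n") — the separator is nonempty, so this is PySem.Chars.splitOn (the sep ≠ "" form)
def pySplitNL (q : String) : List String :=
  (PySem.Chars.splitOn q.toList ['\n']).map String.ofList
-- s[2:]
def pyDrop2 (s : String) : String := PySem.Str.slice s (some 2) none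
-- chr(ord(x)+1) for the one-character answer letter
def pyNextLetter (s : String) : String :=
  match s.toList with
  | [c] => String.ofList [Char.ofNat (c.toNat + 1)]
  | _ => s

-- A's inner loop body: state (q1, q2, answer_start, answer_no), index j
def aStep (st : List String × List String × Int × String) (j : Int) :
    List String × List String × Int × String :=
  let q1 := st.1; let q2 := st.2.1; let astart := st.2.2.1; let ano := st.2.2.2
  if PySem.Str.startswith (PySem.List.pyGetD q1 j "") (ano ++ " ")
      || (PySem.List.pyGetD q1 j "" == ano) then
    let q1' := PySem.List.pySetD q1 astart (pyDrop2 (PySem.List.pyGetD q1 astart ""))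
    (q1',
     q2 ++ [PySem.Str.strip (PySem.Str.join " " (PySem.List.slice q1' (some astart) (some j)))],
     j, pyNextLetter ano)
  else st

-- one question (A's loop body over `questions`); q1[answer_start] raises IndexError on a
-- single-line question — those inputs are excluded by Pre_ below
def aOne (q : String) : String :=
  let q1 := pySplitNL q
  let q2 := [q1.getD 0 ""]
  let st := (PySem.List.pyRange 1 (q1.length : Int) 1).foldl aStep (q1, q2, (1 : Int), "B")
  let q1g := PySem.List.pySetD st.1 st.2.2.1 (pyDrop2 (PySem.List.pyGetD st.1 st.2.2.1 ""))
  PySem.Str.join "\n" (st.2.1 ++ [PySem.Str.strip (PySem.Str.join " " (PySem.List.slice q1g (some st.2.2.1) none))])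

def split_answers (questions : List String) : List String := questions.map aOne

-- ===== PORT B =====
-- _flush: strip the 2 marker characters off the answer's first line, join, strip
def flushCur (cur : List String) : String :=
  match cur with
  | [] => ""    -- unreachable: `current` always holds at least one line
  | c :: rest => PySem.Str.strip (PySem.Str.join " " (pyDrop2 c :: rest))

-- B's inner loop body: state (out, expected, current), next line
def bStep (st : List String × String × List String) (line : String) :
    List String × String × List String :=
  let out := st.1; let expected := st.2.1; let cur := st.2.2
  if (line == expected) || PySem.Str.startswith line (expected ++ " ") then
    (out ++ [flushCur cur], pyNextLetter expected, [line])
  else (out, expected, cur ++ [line])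

-- lines[1] raises IndexError on a single-line question — excluded by Pre_ below
def bOne (q : String) : String :=
  match pySplitNL q with
  | h :: l1 :: rest =>
    let st := rest.foldl bStep ([h], "B", [l1])
    PySem.Str.join "\n" (st.1 ++ [flushCur st.2.2])
  | _ => ""    -- unreachable under Pre_: Python raises IndexError here

def split_answers_alt (questions : List String) : List String := questions.map bOne

-- ===== PRECONDITION & SPEC =====
-- Pre_ excludes exactly the inputs containing a question with no "\n" (a single-line question),
-- on which both Pythons raise IndexError while indexing the non-existent first answer line.
def Pre_split_answers (questions : List String) : Prop :=
  ∀ q ∈ questions, 2 ≤ (pySplitNL q).length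
instance (questions : List String) : Decidable (Pre_split_answers questions) := by
  unfold Pre_split_answers; infer_instance

def pvWitness_split_answers : List String := ["Q\nA x\nB y"]

-- On questions whose second line is itself the "B"-marker, A emits a spurious empty first answer
-- and strips the marker line twice (its first flush slices q1[1] in place and a later flush slices
-- it again), while B reads the line after the heading as the first answer's first line and strips
-- its two marker characters once — the intended formatting.
def D_split_answers (questions : List String) : Prop :=
  ∃ q ∈ questions,
    2 ≤ (pySplitNL q).length ∧
    ((pySplitNL q).getD 1 "" = "B" ∨
      PySem.Str.startswith ((pySplitNL q).getD 1 "") "B " = true)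
instance (questions : List String) : Decidable (D_split_answers questions) := by
  unfold D_split_answers; infer_instance

def Spec_split_answers (questions : List String) (out : List String) : Prop :=
  ¬ D_split_answers questions → out = split_answers_alt questions
instance (questions : List String) (out : List String) : Decidable (Spec_split_answers questions out) := by
  unfold Spec_split_answers; infer_instance

def pvDiffWitness_split_answers : List String := ["Q\nB y"]
def pvDiffWitnessOut_split_answers : (List String) × (List String) := (["Q\n\n"], ["Q\ny"])

-- ===== CLAIM (what is proved, stated in full; the proofs are below) =====
def Claim_unchanged_split_answers : Prop := ∀ (questions : List String), Dom_split_answers questions → Pre_split_answers questions → Spec_split_answers questions (split_answers questions)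
def Claim_changed_split_answers : Prop := Dom_split_answers (pvDiffWitness_split_answers) ∧ Pre_split_answers (pvDiffWitness_split_answers) ∧ D_split_answers (pvDiffWitness_split_answers) ∧ split_answers (pvDiffWitness_split_answers) = pvDiffWitnessOut_split_answers.1 ∧ split_answers_alt (pvDiffWitness_split_answers) = pvDiffWitnessOut_split_answers.2 ∧ pvDiffWitnessOut_split_answers.1 ≠ pvDiffWitnessOut_split_answers.2

-- ===== LEMMAS AND PROOFS =====

-- generic list facts specialised to our loop shapes
theorem getD_eq_of_drop_eq {α : Type} (d : α) {q l : List α} {m k : Nat}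
    (h : q.drop m = l.drop m) (hk : m ≤ k) : q.getD k d = l.getD k d := by
  have h1 : (q.drop m)[k - m]? = (l.drop m)[k - m]? := by rw [h]
  rw [List.getElem?_drop, List.getElem?_drop, Nat.add_sub_cancel' hk] at h1
  simp [List.getD, h1]

theorem getD_set_ne {α : Type} (l : List α) {n m : Nat} (a d : α) (h : n ≠ m) :
    (l.set n a).getD m d = l.getD m d := by
  simp [List.getD, List.getElem?_set_ne h]

theorem set_drop_cons {α : Type} (l : List α) (n : Nat) (a : α) (h : n < l.length) :
    (l.set n a).drop n = a :: l.drop (n + 1) := by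
  rw [List.drop_eq_getElem_cons (by simpa using h)]
  rw [List.drop_set_of_lt (by omega)]
  simp [List.getElem_set_self]

def aFin (st : List String × List String × Int × String) : List String :=
  st.2.1 ++ [PySem.Str.strip (PySem.Str.join " "
    (PySem.List.slice (PySem.List.pySetD st.1 st.2.2.1 (pyDrop2 (PySem.List.pyGetD st.1 st.2.2.1 "")))
      (some st.2.2.1) none))]

def bFin (sb : List String × String × List String) : List String := sb.1 ++ [flushCur sb.2.2]

theorem flushCur_cons (c : String) (r : List String) :
    flushCur (c :: r) = PySem.Str.strip (PySem.Str.join " " (pyDrop2 c :: r)) := rfl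

-- the loop invariant: A's state (q1, q2, answer_start=sn, ch) and B's state (q2, ch, cur) are in
-- step — cur holds exactly the lines ls[sn:jn] of the in-progress answer, q1 agrees with ls from
-- position sn on (only already-flushed positions < sn were sliced in place) — and then the two
-- remaining runs flush the same answers.
theorem loop_eq (ls : List String) (k : Nat) :
    ∀ (jn sn : Nat) (q1 q2 : List String) (ch : String) (cur : List String),
    ls.length - jn = k → sn < jn → jn ≤ ls.length → 1 ≤ sn →
    q1.length = ls.length →
    q1.drop (sn + 1) = ls.drop (sn + 1) →
    q1.getD sn "" = ls.getD sn "" →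
    cur = (ls.drop sn).take (jn - sn) →
    aFin ((PySem.List.pyRange (jn : Int) (ls.length : Int) 1).foldl aStep (q1, q2, (sn : Int), ch))
      = bFin ((ls.drop jn).foldl bStep (q2, ch, cur)) := by
  induction k with
  | zero =>
    intro jn sn q1 q2 ch cur hk hj hjn hs1 hlen hdrop hgd hcur
    have hjeq : jn = ls.length := by omega
    subst hjeq
    have hnil : PySem.List.pyRange (ls.length : Int) (ls.length : Int) 1 = [] :=
      PySem.List.pyRange_one_eq_nil le_rfl
    rw [hnil, List.drop_length]
    simp only [List.foldl_nil]
    have hsl : sn < ls.length := by omega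
    have hslq : sn < q1.length := by omega
    simp only [aFin, bFin, PySem.List.pyGetD_natCast, PySem.List.pySetD_natCast,
      PySem.List.slice_from_natCast]
    rw [set_drop_cons q1 sn _ hslq, hdrop, hgd]
    have htake : (ls.drop sn).take (ls.length - sn) = ls.drop sn :=
      List.take_of_length_le (by simp)
    rw [hcur, htake, List.drop_eq_getElem_cons hsl, flushCur_cons,
      show ls[sn] = ls.getD sn "" from (List.getD_eq_getElem ls "" hsl).symm]
  | succ k ih =>
    intro jn sn q1 q2 ch cur hk hj hjn hs1 hlen hdrop hgd hcur
    have hjl : jn < ls.length := by omega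
    have hjq : jn < q1.length := by omega
    have hsl : sn < ls.length := by omega
    have hslq : sn < q1.length := by omega
    have hrange : PySem.List.pyRange (jn : Int) (ls.length : Int) 1
        = (jn : Int) :: PySem.List.pyRange ((jn + 1 : Nat) : Int) (ls.length : Int) 1 := by
      rw [PySem.List.pyRange_one_cons (by exact_mod_cast hjl)]
      norm_num
    have hdropj : ls.drop jn = ls[jn] :: ls.drop (jn + 1) := List.drop_eq_getElem_cons hjl
    have hq1j : q1.getD jn "" = ls[jn] := by
      rw [getD_eq_of_drop_eq "" hdrop (by omega)]
      exact List.getD_eq_getElem ls "" hjl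
    have hdropq : q1.drop (jn + 1) = ls.drop (jn + 1) := by
      have h1 := congrArg (List.drop (jn - sn)) hdrop
      rw [List.drop_drop, List.drop_drop,
        show sn + 1 + (jn - sn) = jn + 1 by omega] at h1
      exact h1
    rw [hrange, hdropj]
    simp only [List.foldl_cons, aStep, bStep, PySem.List.pyGetD_natCast,
      PySem.List.pySetD_natCast, hq1j]
    rw [Bool.or_comm]
    by_cases hm : ((ls[jn] == ch) || PySem.Str.startswith ls[jn] (ch ++ " ")) = true
    · rw [if_pos hm, if_pos hm]
      -- the two flushed answers are the same string
      obtain ⟨m, hmm⟩ : ∃ m, jn - sn = m + 1 := ⟨jn - sn - 1, by omega⟩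
      have hcurc : cur = ls.getD sn "" :: (ls.drop (sn + 1)).take m := by
        rw [hcur, hmm, List.drop_eq_getElem_cons hsl, List.take_succ_cons,
          List.getD_eq_getElem ls "" hsl]
      have hflush : PySem.Str.strip (PySem.Str.join " "
            (PySem.List.slice (q1.set sn (pyDrop2 (q1.getD sn "")))
              (some ((sn : Nat) : Int)) (some ((jn : Nat) : Int))))
          = flushCur cur := by
        rw [PySem.List.slice_natCast, set_drop_cons q1 sn _ hslq, hdrop, hgd, hmm,
          List.take_succ_cons, hcurc, flushCur_cons]
      rw [hflush]
      refine ih (jn + 1) jn (q1.set sn (pyDrop2 (q1.getD sn "")))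
        (q2 ++ [flushCur cur]) (pyNextLetter ch) [ls[jn]]
        (by omega) (by omega) (by omega) (by omega) (by simpa using hlen)
        ?_ ?_ ?_
      · rw [List.drop_set_of_lt (by omega)]
        exact hdropq
      · rw [getD_set_ne q1 _ "" (by omega : sn ≠ jn), hq1j,
          List.getD_eq_getElem ls "" hjl]
      · rw [show jn + 1 - jn = 1 by omega, hdropj]
        rfl
    · rw [if_neg hm, if_neg hm]
      refine ih (jn + 1) sn q1 q2 ch (cur ++ [ls[jn]])
        (by omega) (by omega) (by omega) hs1 hlen hdrop hgd ?_
      rw [hcur, show jn + 1 - sn = (jn - sn) + 1 by omega, List.take_add_one,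
        List.getElem?_drop, show sn + (jn - sn) = jn by omega,
        List.getElem?_eq_getElem hjl]
      rfl

theorem perQ (q : String) (h2 : 2 ≤ (pySplitNL q).length)
    (hnd : ¬ (2 ≤ (pySplitNL q).length ∧
      ((pySplitNL q).getD 1 "" = "B" ∨
        PySem.Str.startswith ((pySplitNL q).getD 1 "") "B " = true))) :
    aOne q = bOne q := by
  unfold aOne bOne
  generalize hls : pySplitNL q = ls at h2 hnd
  match ls, h2 with
  | a :: b :: t, _ =>
    have hnm : ¬ (b = "B" ∨ PySem.Str.startswith b "B " = true) := by
      intro h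
      exact hnd ⟨by simp, by simpa using h⟩
    simp only []
    have hlen : ((a :: b :: t).length : Int) = ((t.length + 2 : Nat) : Int) := by simp; omega
    have hcons : PySem.List.pyRange ((1 : Nat) : Int) ((t.length + 2 : Nat) : Int) 1
        = ((1 : Nat) : Int) :: PySem.List.pyRange ((2 : Nat) : Int) ((t.length + 2 : Nat) : Int) 1 := by
      rw [PySem.List.pyRange_one_cons (by push_cast; omega)]
      norm_num
    show PySem.Str.join "\n" (aFin ((PySem.List.pyRange ((1 : Nat) : Int) ((a :: b :: t).length : Int) 1).foldl
        aStep (a :: b :: t, [a], ((1 : Nat) : Int), "B")))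
      = PySem.Str.join "\n" (bFin (t.foldl bStep ([a], "B", [b])))
    rw [hlen, hcons]
    simp only [List.foldl_cons, aStep, PySem.List.pyGetD_natCast]
    have hgd1 : (a :: b :: t).getD 1 "" = b := rfl
    have hBB : ("B" ++ " " : String) = "B " := rfl
    rw [hgd1, hBB]
    have hcond : (PySem.Str.startswith b "B " || (b == "B")) = false := by
      rcases h1 : PySem.Str.startswith b "B " with _ | _
      · rcases h2 : (b == "B") with _ | _
        · rfl
        · exact absurd (Or.inl (by simpa using h2)) hnm
      · exact absurd (Or.inr h1) hnm
    rw [hcond]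
    simp only [Bool.false_eq_true, if_false]
    congr 1
    exact loop_eq (a :: b :: t) t.length 2 1 (a :: b :: t) [a] "B" [b]
      (by simp) (by omega) (by simp) (by omega) rfl rfl rfl rfl

-- ===== VERDICT (by name: the statement is the Claim_ definition above) =====
theorem split_answers_spec : Claim_unchanged_split_answers := by
  intro qs _ hpre hnd
  show split_answers qs = split_answers_alt qs
  unfold split_answers split_answers_alt
  refine List.map_congr_left ?_
  intro q hq
  have hndq : ¬ (2 ≤ (pySplitNL q).length ∧
      ((pySplitNL q).getD 1 "" = "B" ∨
        PySem.Str.startswith ((pySplitNL q).getD 1 "") "B " = true)) :=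
    fun hc => hnd ⟨q, hq, hc⟩
  exact perQ q (hpre q hq) hndq

theorem split_answers_changed : Claim_changed_split_answers := by
  unfold Claim_changed_split_answers; decide
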